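-- pv_equiv track=rewrite | github.com/privateAccountOfLiu/FreeOrBit | src/freeorbit/services/orf_window.py | _trim_bins_for_display
-- ===== SOURCE A (Python) =====
-- from typing import Optional
--
-- def _trim_bins_for_display(bins: list[tuple[int, int, int]]) -> list[tuple[int, int, int]]:
--     """去掉首尾频数为 0 的分箱，使横轴紧贴有数据的区间，避免两侧空白过大。"""
--     if len(bins) <= 1:
--         return list(bins)
--     first: Optional[int] = None
--     last: Optional[int] = None
--     for i, (_, _, c) in enumerate(bins):
--         if c > 0:
--             if first is None:
--                 first = i
--             last = i
--     if first is None or last is None: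
--         return list(bins)
--     return bins[first : last + 1]
-- ===== SOURCE B (Python) =====
-- def _trim_bins_for_display(bins: list[tuple[int, int, int]]) -> list[tuple[int, int, int]]:
--     """Single streaming pass that builds the trimmed output directly: zeros before
--     the first positive bin are skipped, interior zeros are buffered and flushed
--     when the next positive bin arrives, so trailing zeros are never emitted."""
--     result: list[tuple[int, int, int]] = []
--     pending: list[tuple[int, int, int]] = []
--     for b in bins:
--         if b[2] > 0:
--             result.extend(pending)
--             pending.clear()
--             result.append(b)
--         elif result:
--             pending.append(b)
--     return result if result else list(bins)
-- ===== Notes on version B (the rewrite author's own statement) =====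
-- stated objective: alternative
-- what changed: Instead of computing first/last nonzero indices and slicing, B builds the trimmed list directly in one streaming pass with a pending-zeros buffer that is flushed only when a later positive bin appears, so no indices or slicing are used at all.
import Mathlib
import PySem

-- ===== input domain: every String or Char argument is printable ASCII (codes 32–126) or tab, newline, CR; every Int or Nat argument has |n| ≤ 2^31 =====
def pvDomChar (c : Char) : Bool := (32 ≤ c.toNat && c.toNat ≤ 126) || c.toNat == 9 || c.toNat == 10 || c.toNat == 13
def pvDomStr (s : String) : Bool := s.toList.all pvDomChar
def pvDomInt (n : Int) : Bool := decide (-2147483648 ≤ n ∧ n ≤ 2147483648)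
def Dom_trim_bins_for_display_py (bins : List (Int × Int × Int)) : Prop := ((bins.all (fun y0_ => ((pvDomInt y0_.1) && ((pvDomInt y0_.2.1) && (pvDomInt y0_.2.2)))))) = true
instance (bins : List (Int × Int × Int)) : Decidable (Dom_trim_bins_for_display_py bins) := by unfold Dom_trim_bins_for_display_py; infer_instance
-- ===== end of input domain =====

-- B replaces A's index bookkeeping (first/last nonzero index, then a slice) by a single
-- streaming pass that builds the trimmed list directly, buffering interior zero bins and
-- flushing the buffer only when a later positive bin arrives; objective: alternative, same O(n).

-- ===== PORT A =====
def trim_bins_for_display_py (bins : List (Int × Int × Int)) : List (Int × Int × Int) :=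
  if bins.length ≤ 1 then bins
  else
    let fl := (PySem.List.enumerate bins 0).foldl
      (fun (st : Option Int × Option Int) (p : Int × (Int × Int × Int)) =>
        if p.2.2.2 > 0 then
          ((match st.1 with | none => some p.1 | some f => some f), some p.1)
        else st) ((none : Option Int), (none : Option Int))
    match fl.1, fl.2 with
    | some f, some l => PySem.List.slice bins (some f) (some (l + 1))
    | _, _ => bins

-- ===== PORT B =====
-- one loop iteration of Source B: positive bin → flush pending and append it; zero bin →
-- buffer it, but only once result is nonempty ("elif result:")
def pvStepB (st : List (Int × Int × Int) × List (Int × Int × Int)) (b : Int × Int × Int) :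
    List (Int × Int × Int) × List (Int × Int × Int) :=
  if b.2.2 > 0 then (st.1 ++ st.2 ++ [b], [])
  else if st.1 ≠ [] then (st.1, st.2 ++ [b])
  else st

def trim_bins_for_display_py_alt (bins : List (Int × Int × Int)) : List (Int × Int × Int) :=
  let st := bins.foldl pvStepB ([], [])
  if st.1 = [] then bins else st.1

-- ===== PRECONDITION & SPEC =====
def Spec_trim_bins_for_display_py (bins : List (Int × Int × Int)) (out : List (Int × Int × Int)) : Prop := out = trim_bins_for_display_py_alt bins
instance (bins : List (Int × Int × Int)) (out : List (Int × Int × Int)) : Decidable (Spec_trim_bins_for_display_py bins out) := by unfold Spec_trim_bins_for_display_py; infer_instance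

-- ===== CLAIM (what is proved, stated in full; the proofs are below) =====
def Claim_equal_trim_bins_for_display_py : Prop := ∀ (bins : List (Int × Int × Int)), Dom_trim_bins_for_display_py bins → Spec_trim_bins_for_display_py bins (trim_bins_for_display_py bins)

-- ===== LEMMAS AND PROOFS =====

-- index of the FIRST element with count > 0, counted from start s
def pvFirstHit : List (Int × Int × Int) → Int → Option Int
  | [], _ => none
  | (_, _, c) :: rest, i => if c > 0 then some i else pvFirstHit rest (i + 1)

-- index of the LAST element with count > 0, counted from start s (characterises A's `last`)
def pvLastAux : List (Int × Int × Int) → Int → Option Int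
  | [], _ => none
  | (_, _, c) :: rest, s =>
    match pvLastAux rest (s + 1) with
    | some v => some v
    | none => if c > 0 then some s else none

lemma pvFold_char (bins : List (Int × Int × Int)) (s : Int) (o l : Option Int) :
    (PySem.List.enumerate bins s).foldl
      (fun (st : Option Int × Option Int) (p : Int × (Int × Int × Int)) =>
        if p.2.2.2 > 0 then
          ((match st.1 with | none => some p.1 | some f => some f), some p.1)
        else st) (o, l)
    = ((match o with | some x => some x | none => pvFirstHit bins s),
       (match pvLastAux bins s with | some v => some v | none => l)) := by
  induction bins generalizing s o l with
  | nil => rcases o with _ | x <;> simp [PySem.List.enumerate_nil, pvFirstHit, pvLastAux]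
  | cons x rest ih =>
    obtain ⟨a, b, c⟩ := x
    rw [PySem.List.enumerate_cons]
    by_cases hc : c > 0
    · simp only [List.foldl_cons, if_pos hc, ih, pvFirstHit, pvLastAux]
      rcases o with _ | f <;> rcases h : pvLastAux rest (s + 1) with _ | v <;> simp
    · simp only [List.foldl_cons, if_neg hc, ih, pvFirstHit, pvLastAux]
      rcases h : pvLastAux rest (s + 1) with _ | v <;> simp [hc]

lemma pvFirstHit_eq_none_iff (xs : List (Int × Int × Int)) (s : Int) :
    pvFirstHit xs s = none ↔ ∀ x ∈ xs, x.2.2 ≤ 0 := by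
  induction xs generalizing s with
  | nil => simp [pvFirstHit]
  | cons y rest ih =>
    obtain ⟨a, b, c⟩ := y
    by_cases hc : c > 0
    · simp only [pvFirstHit, if_pos hc]
      constructor
      · intro h; cases h
      · intro h
        have h2 : c ≤ 0 := h (a, b, c) List.mem_cons_self
        omega
    · simp only [pvFirstHit, if_neg hc, ih, List.mem_cons]
      constructor
      · intro h x hx
        rcases hx with rfl | hx
        · exact Int.not_lt.mp hc
        · exact h x hx
      · intro h x hx; exact h x (Or.inr hx)

lemma pvLastAux_eq_none_iff (xs : List (Int × Int × Int)) (s : Int) :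
    pvLastAux xs s = none ↔ ∀ x ∈ xs, x.2.2 ≤ 0 := by
  induction xs generalizing s with
  | nil => simp [pvLastAux]
  | cons y rest ih =>
    obtain ⟨a, b, c⟩ := y
    simp only [pvLastAux]
    rcases h : pvLastAux rest (s + 1) with _ | v
    · rw [ih] at h
      by_cases hc : c > 0
      · simp only [if_pos hc]
        constructor
        · intro hh; cases hh
        · intro hall
          have h2 : c ≤ 0 := hall (a, b, c) List.mem_cons_self
          omega
      · simp only [if_neg hc, List.mem_cons]
        constructor
        · intro _ x hx
          rcases hx with rfl | hx
          · exact Int.not_lt.mp hc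
          · exact h x hx
        · intro _; trivial
    · constructor
      · intro hh; cases hh
      · intro hall
        have hn : pvLastAux rest (s + 1) = none :=
          (ih (s + 1)).mpr (fun x hx => hall x (List.mem_cons_of_mem _ hx))
        rw [hn] at h; cases h

lemma pvLastAux_snoc (ys : List (Int × Int × Int)) (x : Int × Int × Int) (s : Int) :
    pvLastAux (ys ++ [x]) s
      = if x.2.2 > 0 then some (s + (ys.length : Int)) else pvLastAux ys s := by
  induction ys generalizing s with
  | nil => by_cases hc : x.2.2 > 0 <;> simp [pvLastAux, hc]
  | cons y rest ih =>
    obtain ⟨a, b, c⟩ := y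
    simp only [List.cons_append, pvLastAux, ih]
    by_cases hx : x.2.2 > 0
    · simp [hx]; ring
    · simp [hx]

lemma pvFirstHit_snoc (ys : List (Int × Int × Int)) (x : Int × Int × Int) (s : Int) :
    pvFirstHit (ys ++ [x]) s
      = match pvFirstHit ys s with
        | some f => some f
        | none => if x.2.2 > 0 then some (s + (ys.length : Int)) else none := by
  induction ys generalizing s with
  | nil =>
    obtain ⟨a, b, c⟩ := x
    by_cases hc : c > 0 <;> simp [pvFirstHit, hc]
  | cons y rest ih =>
    obtain ⟨a, b, c⟩ := y
    by_cases hc : c > 0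
    · simp [pvFirstHit, hc]
    · simp only [List.cons_append, pvFirstHit, if_neg hc, ih]
      rcases h : pvFirstHit rest (s + 1) with _ | f
      · by_cases hx : x.2.2 > 0 <;> simp [hx] <;> push_cast <;> ring_nf
      · simp

-- a last hit gives a first hit; both indices are natural, first ≤ last < length
lemma pvBounds (xs : List (Int × Int × Int)) (l : Int) (h : pvLastAux xs 0 = some l) :
    ∃ fk lk : Nat, pvFirstHit xs 0 = some (fk : Int) ∧ l = (lk : Int) ∧ fk ≤ lk ∧ lk < xs.length := by
  induction xs using List.reverseRecOn generalizing l with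
  | nil => simp [pvLastAux] at h
  | append_singleton ys x ih =>
    rw [pvLastAux_snoc] at h
    by_cases hx : x.2.2 > 0
    · rw [if_pos hx] at h
      injection h with h'
      rcases hf : pvFirstHit ys 0 with _ | f
      · refine ⟨ys.length, ys.length, ?_, by omega, le_refl _, by simp⟩
        rw [pvFirstHit_snoc, hf]
        simp [hx]
      · rcases hly : pvLastAux ys 0 with _ | l'
        · exfalso
          rw [pvLastAux_eq_none_iff] at hly
          have hn := (pvFirstHit_eq_none_iff ys 0).mpr hly
          rw [hf] at hn; cases hn
        · obtain ⟨fk, lk, h1, _, h3, h4⟩ := ih l' hly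
          refine ⟨fk, ys.length, ?_, by omega, by omega, by simp⟩
          rw [pvFirstHit_snoc, h1]
    · rw [if_neg hx] at h
      obtain ⟨fk, lk, h1, h2, h3, h4⟩ := ih l h
      refine ⟨fk, lk, ?_, h2, h3, by simp only [List.length_append, List.length_singleton]; omega⟩
      rw [pvFirstHit_snoc, h1]

-- characterisation of Source B's fold state: result = bins[first:last+1], pending = bins[last+1:]
lemma pvBfold_char (xs : List (Int × Int × Int)) :
    xs.foldl pvStepB ([], [])
      = match pvLastAux xs 0, pvFirstHit xs 0 with
        | some l, some f => ((xs.take (l.toNat + 1)).drop f.toNat, xs.drop (l.toNat + 1))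
        | _, _ => (([] : List (Int × Int × Int)), ([] : List (Int × Int × Int))) := by
  induction xs using List.reverseRecOn with
  | nil => simp [pvLastAux, pvFirstHit]
  | append_singleton ys x ih =>
    rw [List.foldl_append, List.foldl_cons, List.foldl_nil, ih,
        pvLastAux_snoc, pvFirstHit_snoc]
    by_cases hx : x.2.2 > 0
    · rw [if_pos hx]
      rcases hly : pvLastAux ys 0 with _ | l'
      · have hfy : pvFirstHit ys 0 = none := by
          rw [pvFirstHit_eq_none_iff]
          rw [pvLastAux_eq_none_iff] at hly
          exact hly
        rw [hfy]
        have hdy : ys.drop ys.length = [] := List.drop_eq_nil_of_le (le_refl _)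
        simp only [pvStepB, if_pos hx, List.nil_append]
        have h1 : ((ys ++ [x]).take ((0 + (ys.length : Int)).toNat + 1)) = ys ++ [x] := by
          rw [List.take_of_length_le]
          simp only [List.length_append, List.length_singleton]; omega
        have h2 : (ys ++ [x]).drop ((0 + (ys.length : Int)).toNat + 1) = [] := by
          apply List.drop_eq_nil_of_le
          simp only [List.length_append, List.length_singleton]; omega
        rw [h1, h2]
        rw [List.drop_append_of_le_length (by omega)]
        rw [show ((0 + (ys.length : Int)).toNat) = ys.length by omega, hdy]
        simp
      · obtain ⟨fk, lk, hf, hl', hfl, hlk⟩ := pvBounds ys l' hly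
        rw [hf]
        simp only [pvStepB, if_pos hx]
        have hmerge : (ys.take (l'.toNat + 1)).drop (fk : Int).toNat ++ ys.drop (l'.toNat + 1)
            = ys.drop fk := by
          rw [Int.toNat_natCast]
          conv_rhs => rw [← List.take_append_drop (l'.toNat + 1) ys]
          rw [List.drop_append_of_le_length (by rw [List.length_take]; omega)]
        have htk : (ys ++ [x]).take ((0 + (ys.length : Int)).toNat + 1) = ys ++ [x] := by
          rw [List.take_of_length_le]
          simp only [List.length_append, List.length_singleton]; omega
        have hdp : (ys ++ [x]).drop ((0 + (ys.length : Int)).toNat + 1) = [] := by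
          apply List.drop_eq_nil_of_le
          simp only [List.length_append, List.length_singleton]; omega
        rw [htk, hdp, hmerge]
        rw [List.drop_append_of_le_length (by omega), Int.toNat_natCast]
    · rw [if_neg hx]
      rcases hly : pvLastAux ys 0 with _ | l'
      · have hfy : pvFirstHit ys 0 = none := by
          rw [pvFirstHit_eq_none_iff]
          rw [pvLastAux_eq_none_iff] at hly
          exact hly
        rw [hfy]
        simp [pvStepB, hx]
      · obtain ⟨fk, lk, hf, hl', hfl, hlk⟩ := pvBounds ys l' hly
        rw [hf]
        have hne : (ys.take (l'.toNat + 1)).drop (fk : Int).toNat ≠ [] := by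
          intro hnil
          have := congrArg List.length hnil
          rw [List.length_drop, List.length_take] at this
          simp at this
          omega
        simp only [pvStepB, if_neg hx, if_pos hne]
        rw [List.take_append_of_le_length (by omega),
            List.drop_append_of_le_length (by omega)]

-- ===== VERDICT (by name: the statement is the Claim_ definition above) =====
theorem trim_bins_for_display_py_spec : Claim_equal_trim_bins_for_display_py := by
  unfold Claim_equal_trim_bins_for_display_py
  intro bins _
  unfold Spec_trim_bins_for_display_py trim_bins_for_display_py trim_bins_for_display_py_alt
  simp only
  rw [pvBfold_char]
  by_cases hlen : bins.length ≤ 1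
  · rw [if_pos hlen]
    match bins, hlen with
    | [], _ => simp [pvLastAux, pvFirstHit]
    | [(a, b, c)], _ =>
      by_cases hc : c > 0
      · simp [pvLastAux, pvFirstHit, hc]
      · simp [pvLastAux, pvFirstHit, hc]
  · rw [if_neg hlen]
    rw [pvFold_char bins 0 none none]
    rcases hly : pvLastAux bins 0 with _ | l
    · have hfy : pvFirstHit bins 0 = none := by
        rw [pvFirstHit_eq_none_iff]
        rw [pvLastAux_eq_none_iff] at hly
        exact hly
      simp [hfy]
    · obtain ⟨fk, lk, hf, hl, hfl, hlk⟩ := pvBounds bins l hly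
      have hne : (bins.take (l.toNat + 1)).drop (fk : Int).toNat ≠ [] := by
        intro hnil
        have := congrArg List.length hnil
        rw [List.length_drop, List.length_take] at this
        simp at this
        omega
      simp only [hf, if_neg hne]
      rw [PySem.List.slice_toNat _ (by omega) (by omega)]
      rw [List.drop_take]
      congr 1
      omega
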